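-- pv_equiv track=rewrite | github.com/pypi-data/pypi-mirror-353 | packages/gxsmread/gxsmread-0.2.4-py3-none-any.whl/gxsmread/spec.py | extract_raw_metadata
-- ===== SOURCE A (Python) =====
-- COMMENT = '#C'
--
-- MD_STRIP_CHARS = '# '
--
-- MD_KEY_VAL_DELINEATOR = '::'
--
-- def extract_raw_metadata(lines: list[str]) -> dict[str, str]:
--     """Extract metadata from spec file lines into dict.
--
--     Given the read lines from a spectroscopy file, extract the raw metadata
--     and return it as a dict of metadata key and vals (both str).
--
--     This metadata is of format:
--         # KEY :: SUB_KEY1=... SUB_KEY2=...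
--
--     This method will extract the keys as independent attributes, with the full
--     val string (consisting of various sub keys) stored as a metadata element.
--
--     Args:
--         lines: list[str] of read lines from a spectroscpy file.
--
--     Returns:
--         str:str key:val dict containing METADATA_KEY:METADATA_STR.
--     """
--     comment_indices = [i for i, v in enumerate(lines) if
--                        v.startswith(COMMENT)]
--
--     # Extract the metadata (OWN METHOD)
--     raw_metadata = {}
--     md_lines = lines[1:comment_indices[0]]
--
--     # Skip lines without metadata key:vals
--     md_lines = [line for line in md_lines if MD_KEY_VAL_DELINEATOR in line]
--
--     for line in md_lines:
--         kv = line.split(MD_KEY_VAL_DELINEATOR)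
--         k = kv[0].strip(MD_STRIP_CHARS)
--         v = kv[1].strip()
--         raw_metadata[k] = v
--
--     return raw_metadata
-- ===== SOURCE B (Python) =====
-- COMMENT = '#C'
--
-- MD_STRIP_CHARS = '# '
--
-- MD_KEY_VAL_DELINEATOR = '::'
--
-- def extract_raw_metadata(lines: list[str]) -> dict[str, str]:
--     """Single forward pass: collect key::val lines until the first comment line."""
--     raw_metadata = {}
--     for i, line in enumerate(lines):
--         if line.startswith(COMMENT):
--             return raw_metadata
--         if i == 0:
--             continue
--         if MD_KEY_VAL_DELINEATOR in line:
--             kv = line.split(MD_KEY_VAL_DELINEATOR)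
--             raw_metadata[kv[0].strip(MD_STRIP_CHARS)] = kv[1].strip()
--     return raw_metadata
-- ===== Notes on version B (the rewrite author's own statement) =====
-- stated objective: simpler
-- what changed: Replaced A's four passes (enumerate+filter index list, slice, delimiter filter, dict loop) with one forward scan that returns the dict at the first '#C' comment line; Pre_ excludes inputs with no comment line, where A raises IndexError.
import Mathlib
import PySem

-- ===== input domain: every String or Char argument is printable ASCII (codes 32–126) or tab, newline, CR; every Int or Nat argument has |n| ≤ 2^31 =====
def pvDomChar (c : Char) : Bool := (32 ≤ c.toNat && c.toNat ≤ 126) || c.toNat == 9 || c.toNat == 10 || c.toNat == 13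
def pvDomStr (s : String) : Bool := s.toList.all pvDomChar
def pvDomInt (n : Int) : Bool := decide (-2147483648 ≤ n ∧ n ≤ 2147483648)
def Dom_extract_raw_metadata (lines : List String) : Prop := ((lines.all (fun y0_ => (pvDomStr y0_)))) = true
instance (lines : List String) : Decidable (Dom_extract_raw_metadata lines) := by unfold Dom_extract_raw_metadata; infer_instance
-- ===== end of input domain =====

-- B is a single forward scan (simpler decomposition); return-value equivalence is proved on inputs where A returns (some line starts with "#C").

-- ===== PORT A =====
def extract_raw_metadata (lines : List String) : List (String × String) :=
  let comment_indices : List Int :=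
    ((PySem.List.enumerate lines 0).filter (fun pr => PySem.Str.startswith pr.2 "#C")).map (·.1)
  match comment_indices with
  | [] => []  -- Python raises IndexError here (comment_indices[0]); excluded by Pre_
  | c :: _ =>
    let md_lines := PySem.List.slice lines (some 1) (some c)
    let md_lines := md_lines.filter (fun line => PySem.Str.isIn "::" line)
    let d : PySem.Dict String String := md_lines.foldl (fun d line =>
      let kv := (PySem.Str.split? line "::").getD []
      d.insert (PySem.Str.stripChars (PySem.List.pyGetD kv 0 "") "# ")
               (PySem.Str.strip (PySem.List.pyGetD kv 1 ""))) PySem.Dict.empty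
    d.items

-- ===== PORT B =====
-- the single forward scan of Source B: stop at the first comment line, skip index 0, collect key::val lines
def ermAltGo (d : PySem.Dict String String) (i : Nat) (lines : List String) : PySem.Dict String String :=
  match lines with
  | [] => d
  | line :: rest =>
    if PySem.Str.startswith line "#C" then d
    else if i = 0 then ermAltGo d (i + 1) rest
    else if PySem.Str.isIn "::" line then
      let kv := (PySem.Str.split? line "::").getD []
      ermAltGo (d.insert (PySem.Str.stripChars (PySem.List.pyGetD kv 0 "") "# ")
                         (PySem.Str.strip (PySem.List.pyGetD kv 1 ""))) (i + 1) rest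
    else ermAltGo d (i + 1) rest

def extract_raw_metadata_alt (lines : List String) : List (String × String) :=
  (ermAltGo PySem.Dict.empty 0 lines).items

-- ===== PRECONDITION & SPEC =====
-- A raises IndexError exactly when no line starts with "#C"; Pre_ admits the inputs with a comment line.
def Pre_extract_raw_metadata (lines : List String) : Prop :=
  (lines.any (fun line => PySem.Str.startswith line "#C")) = true
instance (lines : List String) : Decidable (Pre_extract_raw_metadata lines) := by
  unfold Pre_extract_raw_metadata; infer_instance

def pvWitness_extract_raw_metadata : List String := ["header", "X :: 1", "#C data"]

def Spec_extract_raw_metadata (lines : List String) (out : List (String × String)) : Prop := out = extract_raw_metadata_alt lines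
instance (lines : List String) (out : List (String × String)) : Decidable (Spec_extract_raw_metadata lines out) := by unfold Spec_extract_raw_metadata; infer_instance

-- ===== CLAIM (what is proved, stated in full; the proofs are below) =====
def Claim_equal_extract_raw_metadata : Prop := ∀ (lines : List String), Dom_extract_raw_metadata lines → Pre_extract_raw_metadata lines → Spec_extract_raw_metadata lines (extract_raw_metadata lines)

-- ===== LEMMAS AND PROOFS =====

-- the shared per-line dict update
def ermStep (d : PySem.Dict String String) (line : String) : PySem.Dict String String :=
  let kv := (PySem.Str.split? line "::").getD []
  d.insert (PySem.Str.stripChars (PySem.List.pyGetD kv 0 "") "# ")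
           (PySem.Str.strip (PySem.List.pyGetD kv 1 ""))

-- B's scan past index 0 is a fold over the delimiter-filtered prefix before the first comment
lemma ermAltGo_eq (xs : List String) : ∀ (d : PySem.Dict String String) (j : Nat),
    ermAltGo d (j + 1) xs =
      ((xs.takeWhile (fun line => !PySem.Str.startswith line "#C")).filter
        (fun line => PySem.Str.isIn "::" line)).foldl ermStep d := by
  induction xs with
  | nil => intro d j; simp only [ermAltGo, List.takeWhile_nil, List.filter_nil, List.foldl_nil]
  | cons x t ih =>
    intro d j
    cases hx : PySem.Str.startswith x "#C" with
    | true =>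
      simp only [ermAltGo, hx, if_true, List.takeWhile_cons, Bool.not_true, Bool.false_eq_true,
        if_false, List.filter_nil, List.foldl_nil]
    | false =>
      simp only [ermAltGo, hx, Bool.false_eq_true, if_false, List.takeWhile_cons, Bool.not_false,
        if_true, List.filter_cons]
      rw [if_neg (Nat.succ_ne_zero j)]
      cases hd : PySem.Str.isIn "::" x with
      | true =>
        simp only [if_true, List.foldl_cons]
        rw [ih _ (j + 1)]
        rfl
      | false =>
        simp only [Bool.false_eq_true, if_false]
        rw [ih _ (j + 1)]

-- head of A's comment-index list: start plus the length of the comment-free prefix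
lemma ci_head (xs : List String) : ∀ (s : Int),
    (xs.any (fun line => PySem.Str.startswith line "#C")) = true →
    ((((PySem.List.enumerate xs s).filter (fun pr => PySem.Str.startswith pr.2 "#C")).map (·.1)).head?) =
      some (s + ((xs.takeWhile (fun line => !PySem.Str.startswith line "#C")).length : Int)) := by
  induction xs with
  | nil => intro s h; simp at h
  | cons x t ih =>
    intro s h
    cases hx : PySem.Str.startswith x "#C" with
    | true =>
      simp only [PySem.List.enumerate_cons, List.filter_cons, hx, if_true, List.map_cons,
        List.head?_cons, List.takeWhile_cons, Bool.not_true, Bool.false_eq_true, if_false,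
        List.length_nil, Nat.cast_zero, add_zero]
    | false =>
      simp only [List.any_cons, hx, Bool.false_or] at h
      simp only [PySem.List.enumerate_cons, List.filter_cons, hx, Bool.false_eq_true, if_false,
        List.takeWhile_cons, Bool.not_false, if_true, List.length_cons]
      rw [ih (s + 1) h]
      congr 1
      push_cast
      ring

-- takeWhile is the take of its own length
lemma takeWhile_eq_take_len {α : Type} (p : α → Bool) (l : List α) :
    l.take (l.takeWhile p).length = l.takeWhile p :=
  ((List.prefix_iff_eq_take).1 (List.takeWhile_prefix p)).symm

-- ===== VERDICT (by name: the statement is the Claim_ definition above) =====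
theorem extract_raw_metadata_spec : Claim_equal_extract_raw_metadata := by
  intro lines _ hpre
  unfold Spec_extract_raw_metadata Pre_extract_raw_metadata at *
  cases lines with
  | nil => simp at hpre
  | cons l0 rest =>
    unfold extract_raw_metadata extract_raw_metadata_alt
    cases h0 : PySem.Str.startswith l0 "#C" with
    | true =>
      -- comment at index 0: both return the empty dict
      simp only [PySem.List.enumerate_cons, List.filter_cons, h0, if_true, List.map_cons]
      rw [PySem.List.slice_toNat (l0 :: rest) (by norm_num) (by norm_num)]
      simp only [Int.toNat_one, Int.toNat_zero, Nat.zero_sub, List.take_zero, List.filter_nil,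
        List.foldl_nil, ermAltGo, h0, if_true]
    | false =>
      have hhead := ci_head (l0 :: rest) 0 hpre
      simp only [List.takeWhile_cons, h0, Bool.not_false, if_true, List.length_cons] at hhead
      cases hci : ((((PySem.List.enumerate (l0 :: rest) 0).filter
          (fun pr => PySem.Str.startswith pr.2 "#C")).map (·.1))) with
      | nil => rw [hci] at hhead; simp at hhead
      | cons c tlc =>
        rw [hci] at hhead
        simp only [List.head?_cons, Option.some.injEq] at hhead
        subst hhead
        simp only [hci]
        -- A's slice is the comment-free prefix of rest
        have hslice : PySem.List.slice (l0 :: rest) (some 1)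
              (some (0 + (((rest.takeWhile (fun line => !PySem.Str.startswith line "#C")).length + 1 : Nat) : Int)))
            = rest.takeWhile (fun line => !PySem.Str.startswith line "#C") := by
          rw [zero_add, show ((1 : Int)) = (((1 : Nat) : Int)) by norm_num, PySem.List.slice_natCast]
          simp only [List.drop_succ_cons, List.drop_zero, Nat.add_sub_cancel]
          exact takeWhile_eq_take_len _ rest
        rw [hslice]
        -- B's single scan
        simp only [ermAltGo, h0, Bool.false_eq_true, if_false]
        rw [show (0 + 1 : Nat) = 0 + 1 from rfl, ermAltGo_eq rest PySem.Dict.empty 0]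
        rfl
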